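-- pv_equiv track=rewrite | github.com/sile16/bgai | bgai/endgame/generator_numba.py | generate_all_positions
-- ===== SOURCE A (Python) =====
-- from typing import Tuple, List, Set
--
-- MAX_CHECKERS_DEFAULT = 15
--
-- NUM_POINTS_DEFAULT = 6
--
-- def generate_all_positions(max_checkers: int = MAX_CHECKERS_DEFAULT,
--                            num_points: int = NUM_POINTS_DEFAULT) -> List[Tuple[int, ...]]:
--     """Generate all bearoff positions as tuples."""
--     positions = []
--
--     def gen(remaining: int, points_left: int, current: List[int]):
--         if points_left == 1:
--             positions.append(tuple(current + [remaining]))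
--             return
--         for v in range(remaining + 1):
--             gen(remaining - v, points_left - 1, current + [v])
--
--     for total in range(max_checkers + 1):
--         gen(total, num_points, [])
--
--     return positions
-- ===== SOURCE B (Python) =====
-- def _combos(xs, k):
--     """All k-element combinations of list xs, in itertools (lexicographic) order."""
--     if k == 0:
--         return [[]]
--     if len(xs) < k:
--         return []
--     if not xs:
--         return []
--     head, tail = xs[0], xs[1:]
--     return [[head] + c for c in _combos(tail, k - 1)] + _combos(tail, k)
--
--
-- def generate_all_positions(max_checkers: int = 15, num_points: int = 6):
--     """Generate all bearoff positions as tuples (stars-and-bars enumeration)."""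
--     positions = []
--     for total in range(max_checkers + 1):
--         n = total + num_points - 1
--         for combo in _combos(list(range(n)), num_points - 1):
--             prev = -1
--             pos = []
--             for c in combo:
--                 pos.append(c - prev - 1)
--                 prev = c
--             pos.append(n - prev - 1)
--             positions.append(tuple(pos))
--     return positions
-- ===== Notes on version B (the rewrite author's own statement) =====
-- stated objective: alternative
-- what changed: Replaces A's recursive DFS over per-point checker counts by a stars-and-bars enumeration: for each total it enumerates divider placements (k-combinations of range(total+num_points-1), in lexicographic order) and converts each to the composition of successive gaps, yielding the same lists in the same order.
import Mathlib
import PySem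

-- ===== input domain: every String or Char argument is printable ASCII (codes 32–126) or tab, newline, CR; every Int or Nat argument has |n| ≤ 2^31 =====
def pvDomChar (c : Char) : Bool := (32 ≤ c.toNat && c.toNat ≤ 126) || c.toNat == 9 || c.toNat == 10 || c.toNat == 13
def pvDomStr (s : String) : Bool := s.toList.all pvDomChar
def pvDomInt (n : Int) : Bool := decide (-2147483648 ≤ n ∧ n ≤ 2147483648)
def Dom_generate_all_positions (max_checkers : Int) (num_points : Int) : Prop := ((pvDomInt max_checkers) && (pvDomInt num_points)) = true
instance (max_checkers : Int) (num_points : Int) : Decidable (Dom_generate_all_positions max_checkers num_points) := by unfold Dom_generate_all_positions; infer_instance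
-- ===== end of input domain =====

-- B replaces A's recursive DFS by a stars-and-bars enumeration (divider combinations turned
-- into gap compositions) producing the same lists in the same order; objective: alternative.

-- ===== PORT A =====
-- inner 'def gen(remaining, points_left, current)' of A, with the accumulated 'positions' threaded;
-- points_left is carried as the Nat num_points.toNat (Pre_ guarantees num_points ≥ 1; for
-- points_left ≤ 0 Python recurses forever — excluded by Pre_, the 0-case here returns acc).
def genA : Int → Nat → List Int → List (List Int) → List (List Int)
  | _, 0, _, acc => acc
  | r, 1, cur, acc => acc ++ [cur ++ [r]]
  | r, p+2, cur, acc =>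
      (PySem.List.pyRange 0 (r+1) 1).foldl (fun a v => genA (r-v) (p+1) (cur ++ [v]) a) acc

def generate_all_positions (max_checkers : Int) (num_points : Int) : List (List Int) :=
  (PySem.List.pyRange 0 (max_checkers+1) 1).foldl
    (fun positions total => genA total num_points.toNat [] positions) []

-- ===== PORT B =====
-- _combos of Source B (itertools-order k-combinations); k is an Int exactly as in Python
def combosB (xs : List Int) (k : Int) : List (List Int) :=
  if k = 0 then [[]]
  else if (xs.length : Int) < k then []
  else
    match xs with
    | [] => []
    | x :: t => (combosB t (k - 1)).map (fun c => x :: c) ++ combosB t k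
termination_by xs.length
decreasing_by all_goals simp [List.length_cons]

-- the 'for c in combo' gap-conversion loop of Source B, recursing on the combo
def convB (prev n : Int) : List Int → List Int
  | [] => [n - prev - 1]
  | c :: cs => (c - prev - 1) :: convB c n cs

def generate_all_positions_alt (max_checkers : Int) (num_points : Int) : List (List Int) :=
  (PySem.List.pyRange 0 (max_checkers+1) 1).foldl
    (fun positions total =>
      let n := total + num_points - 1
      (combosB (PySem.List.pyRange 0 n 1) (num_points - 1)).foldl
        (fun ps combo => ps ++ [convB (-1) n combo]) positions) []

-- ===== PRECONDITION & SPEC =====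
-- Pre_ excludes exactly the inputs where A raises RecursionError: num_points ≤ 0 while the
-- outer loop is nonempty (max_checkers ≥ 0).
def Pre_generate_all_positions (max_checkers : Int) (num_points : Int) : Prop :=
  1 ≤ num_points ∨ max_checkers < 0
instance (max_checkers : Int) (num_points : Int) : Decidable (Pre_generate_all_positions max_checkers num_points) := by unfold Pre_generate_all_positions; infer_instance

def pvWitness_generate_all_positions : Int × Int := (3, 2)

def Spec_generate_all_positions (max_checkers : Int) (num_points : Int) (out : List (List Int)) : Prop := out = generate_all_positions_alt max_checkers num_points
instance (max_checkers : Int) (num_points : Int) (out : List (List Int)) : Decidable (Spec_generate_all_positions max_checkers num_points out) := by unfold Spec_generate_all_positions; infer_instance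

-- ===== CLAIM (what is proved, stated in full; the proofs are below) =====
def Claim_equal_generate_all_positions : Prop := ∀ (max_checkers : Int) (num_points : Int), Dom_generate_all_positions max_checkers num_points → Pre_generate_all_positions max_checkers num_points → Spec_generate_all_positions max_checkers num_points (generate_all_positions max_checkers num_points)

-- ===== LEMMAS AND PROOFS =====

-- the list of compositions of r into p parts, in A's DFS order (proof-only specification)
def listA : Int → Nat → List (List Int)
  | _, 0 => []
  | r, 1 => [[r]]
  | r, p+2 => (PySem.List.pyRange 0 (r+1) 1).flatMap (fun v => (listA (r-v) (p+1)).map (fun l => v :: l))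

def shiftHead (d : Int) : List Int → List Int
  | [] => []
  | x :: t => (x + d) :: t

theorem genA_eq (p : Nat) : ∀ (r : Int) (cur : List Int) (acc : List (List Int)),
    genA r p cur acc = acc ++ (listA r p).map (fun l => cur ++ l) := by
  induction p with
  | zero => intro r cur acc; simp [genA, listA]
  | succ q ih =>
      match q with
      | 0 => intro r cur acc; simp [genA, listA]
      | q'+1 =>
        intro r cur acc
        show genA r (q'+2) cur acc = _
        rw [genA]
        have hc : List.foldl (fun a v => genA (r - v) (q' + 1) (cur ++ [v]) a) acc (PySem.List.pyRange 0 (r+1) 1)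
            = List.foldl (fun a v => a ++ (listA (r-v) (q'+1)).map (fun l => (cur ++ [v]) ++ l)) acc (PySem.List.pyRange 0 (r+1) 1) :=
          by apply PySem.List.foldl_congr_mem; intro a v _; exact ih (r-v) (cur ++ [v]) a
        rw [hc, PySem.List.foldl_append_eq_flatMap]
        rw [listA]
        simp [List.map_flatMap, List.map_map, Function.comp_def]

theorem convB_shift (combo : List Int) (prev d n : Int) :
    convB (prev - d) n combo = shiftHead d (convB prev n combo) := by
  cases combo <;> simp [convB, shiftHead] <;> ring

theorem combosB_nil_of_short : ∀ (xs : List Int) (k : Int), (xs.length : Int) < k → combosB xs k = [] := by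
  intro xs k h
  rw [combosB.eq_def, if_neg (by omega), if_pos h]

theorem pyRange_shift (a b d : Int) :
    PySem.List.pyRange (a+d) (b+d) 1 = (PySem.List.pyRange a b 1).map (· + d) := by
  simp [PySem.List.pyRange_one, List.map_map]
  intro k _; ring


theorem tail_eq (r : Int) (j : Nat) (_hr : 1 ≤ r) :
    (PySem.List.pyRange 1 (r+1) 1).flatMap (fun v => (listA (r-v) (j+1)).map (fun l => v :: l))
      = (listA (r-1) (j+1+1)).map (shiftHead 1) := by
  rw [listA, List.map_flatMap]
  rw [show r - 1 + 1 = r by ring]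
  have hsh : PySem.List.pyRange 1 (r+1) 1 = (PySem.List.pyRange 0 r 1).map (· + 1) := by
    simpa using pyRange_shift 0 r 1
  rw [hsh, List.flatMap_map]
  congr 1
  funext v
  rw [show r - (v+1) = r - 1 - v by ring]
  simp [Function.comp_def, List.map_map, shiftHead]

theorem combos_conv_eq (m : Nat) : ∀ (k : Nat) (a n : Int), (n - a).toNat = m → (k : Int) ≤ n - a →
    (combosB (PySem.List.pyRange a n 1) (k : Int)).map (convB (a-1) n) = listA (n - a - k) (k+1) := by
  induction m with
  | zero =>
      intro k a n hm hk
      have hk0 : k = 0 := by omega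
      subst hk0
      rw [PySem.List.pyRange_one_eq_nil (by omega), combosB]
      simp [convB, listA]
      omega
  | succ m ih =>
      intro k a n hm hk
      have ha : a < n := by omega
      rw [PySem.List.pyRange_one_cons ha]
      cases k with
      | zero =>
          rw [combosB]
          simp [convB, listA]
          omega
      | succ j =>
          rw [combosB, if_neg (by push_cast; omega),
              if_neg (by simp [PySem.List.length_pyRange_one]; omega)]
          rw [List.map_append, List.map_map]
          push_cast
          rw [show (j:Int) + 1 - 1 = (j:Int) from by ring]
          -- chunk 1 via IH at (j, a+1)
          have hmy : (n - (a+1)).toNat = m := by omega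
          have ih1 := ih j (a+1) n hmy (by push_cast at hk; omega)
          rw [show (a:Int) + 1 - 1 = a from by ring] at ih1
          have hc1 : (convB (a-1) n) ∘ (fun c => a :: c) = (fun l => (0:Int) :: l) ∘ (convB a n) := by
            funext c; simp [convB]
          rw [hc1, ← List.map_map, ih1]
          -- chunk 2 via the shift
          have hshift : (convB (a-1) n) = (shiftHead 1) ∘ (convB a n) := by
            funext c; simpa using convB_shift c a 1 n
          rw [hshift, ← List.map_map]
          -- RHS
          set r : Int := n - a - ((j:Int)+1) with hrdef
          have hr0 : 0 ≤ r := by push_cast at hk; omega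
          rw [show n - (a+1) - (j:Int) = r from by omega]
          rw [listA, PySem.List.pyRange_one_cons (by omega : (0:Int) < r+1), List.flatMap_cons]
          rw [show r - 0 = r from by ring]
          congr 1
          by_cases hc : ((j:Int)+1) ≤ n - (a+1)
          · have ih2 := ih (j+1) (a+1) n hmy (by push_cast; omega)
            push_cast at ih2
            rw [show (a:Int) + 1 - 1 = a from by ring] at ih2
            rw [ih2, show n - (a+1) - ((j:Int)+1) = r - 1 from by omega]
            rw [show (0:Int) + 1 = 1 from by ring]
            exact (tail_eq r j (by omega)).symm
          · have hr1 : r = 0 := by omega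
            rw [combosB_nil_of_short _ _ (by simp [PySem.List.length_pyRange_one]; omega)]
            rw [hr1]
            rw [show (0:Int) + 1 = 1 from by ring, PySem.List.pyRange_one_eq_nil (by omega)]
            simp

-- ===== VERDICT (by name: the statement is the Claim_ definition above) =====
theorem generate_all_positions_spec : Claim_equal_generate_all_positions := by
  intro mc np _ hpre
  unfold Spec_generate_all_positions generate_all_positions generate_all_positions_alt
  by_cases hmc : mc < 0
  · rw [PySem.List.pyRange_one_eq_nil (by omega)]
    simp
  · have hnp : 1 ≤ np := by rcases hpre with h | h; exact h; omega
    have hA : (PySem.List.pyRange 0 (mc+1) 1).foldl (fun positions total => genA total np.toNat [] positions) []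
        = (PySem.List.pyRange 0 (mc+1) 1).foldl (fun acc total => acc ++ listA total np.toNat) [] := by
      apply PySem.List.foldl_congr_mem
      intro acc total _
      rw [genA_eq]
      simp
    have hB : (PySem.List.pyRange 0 (mc+1) 1).foldl
        (fun positions total =>
          let n := total + np - 1
          (combosB (PySem.List.pyRange 0 n 1) (np - 1)).foldl
            (fun ps combo => ps ++ [convB (-1) n combo]) positions) []
        = (PySem.List.pyRange 0 (mc+1) 1).foldl (fun acc total => acc ++ listA total np.toNat) [] := by
      apply PySem.List.foldl_congr_mem
      intro acc total htot
      have ht0 : 0 ≤ total := (PySem.List.mem_pyRange_one.mp htot).1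
      show (combosB (PySem.List.pyRange 0 (total + np - 1) 1) (np - 1)).foldl
            (fun ps combo => ps ++ [convB (-1) (total + np - 1) combo]) acc
          = acc ++ listA total np.toNat
      rw [PySem.List.foldl_append_singleton_eq_map]
      congr 1
      have hm := combos_conv_eq ((total + np - 1 - 0).toNat) ((np-1).toNat) 0 (total + np - 1) rfl
        (by rw [show (((np-1).toNat : Nat) : Int) = np - 1 from by omega]; omega)
      rw [show (((np-1).toNat : Nat) : Int) = np - 1 from by omega,
          show (0:Int) - 1 = -1 from by norm_num,
          show total + np - 1 - 0 - (np - 1) = total from by ring,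
          show (np-1).toNat + 1 = np.toNat from by omega] at hm
      exact hm
    rw [hA, hB]
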